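-- pv_equiv track=rewrite | github.com/hz920120/leetcode_python | huawei/HJ20.py | check_rule_2
-- ===== SOURCE A (Python) =====
-- def check_rule_2(str):
--     case = 0
--     CASE = 0
--     num = 0
--     other = 0
--     for ch in str:
--         if case + CASE + num + other >= 3:
--             return True
--         asc = ord(ch)
--         if asc >= 97 and asc <= 122:
--             case = 1
--         elif asc >= 65 and asc <= 90:
--             CASE = 1
--         elif asc >= 48 and asc <= 57:
--             num = 1
--         elif asc != 32 and asc != 10:
--             other = 1
--     return case + CASE + num + other >= 3
-- ===== SOURCE B (Python) =====
-- def check_rule_2(str):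
--     low = any(97 <= ord(c) <= 122 for c in str)
--     up = any(65 <= ord(c) <= 90 for c in str)
--     dig = any(48 <= ord(c) <= 57 for c in str)
--     oth = any(not (97 <= ord(c) <= 122 or 65 <= ord(c) <= 90 or 48 <= ord(c) <= 57)
--               and ord(c) != 32 and ord(c) != 10 for c in str)
--     return low + up + dig + oth >= 3
-- ===== Notes on version B (the rewrite author's own statement) =====
-- stated objective: simpler
-- what changed: Replaced the single stateful loop with early return and four mutable 0/1 flags by four independent any() category scans whose boolean sum is compared with 3.
import Mathlib
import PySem

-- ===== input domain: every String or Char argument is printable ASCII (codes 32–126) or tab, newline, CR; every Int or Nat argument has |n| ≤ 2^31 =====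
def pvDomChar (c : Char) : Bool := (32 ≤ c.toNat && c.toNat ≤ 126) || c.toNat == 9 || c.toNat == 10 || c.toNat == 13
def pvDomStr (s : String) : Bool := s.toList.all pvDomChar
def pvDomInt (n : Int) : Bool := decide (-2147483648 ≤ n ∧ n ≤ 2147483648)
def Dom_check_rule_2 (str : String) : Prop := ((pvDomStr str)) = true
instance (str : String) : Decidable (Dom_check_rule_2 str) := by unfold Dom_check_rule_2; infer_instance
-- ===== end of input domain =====

-- B replaces A's stateful early-return loop over four 0/1 flags by four independent any-scans, one per character category (simpler decomposition, same O(n) cost).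


-- ===== PORT A =====
-- loop over the characters carrying the four integer flags; early return when the sum already reaches 3
def checkRule2Loop : List Char → Int → Int → Int → Int → Bool
  | [], case, CASE, num, other => decide (case + CASE + num + other ≥ 3)
  | ch :: rest, case, CASE, num, other =>
    if case + CASE + num + other ≥ 3 then true
    else
      let asc : Int := (ch.toNat : Int)
      if asc ≥ 97 ∧ asc ≤ 122 then checkRule2Loop rest 1 CASE num other
      else if asc ≥ 65 ∧ asc ≤ 90 then checkRule2Loop rest case 1 num other
      else if asc ≥ 48 ∧ asc ≤ 57 then checkRule2Loop rest case CASE 1 other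
      else if asc ≠ 32 ∧ asc ≠ 10 then checkRule2Loop rest case CASE num 1
      else checkRule2Loop rest case CASE num other

def check_rule_2 (str : String) : Bool :=
  checkRule2Loop str.toList 0 0 0 0

-- ===== PORT B =====
def pvBool2Int (b : Bool) : Int := if b then 1 else 0

def check_rule_2_alt (str : String) : Bool :=
  let low := str.toList.any (fun c => decide (97 ≤ (c.toNat : Int) ∧ (c.toNat : Int) ≤ 122))
  let up := str.toList.any (fun c => decide (65 ≤ (c.toNat : Int) ∧ (c.toNat : Int) ≤ 90))
  let dig := str.toList.any (fun c => decide (48 ≤ (c.toNat : Int) ∧ (c.toNat : Int) ≤ 57))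
  let oth := str.toList.any (fun c => decide (¬ ((97 ≤ (c.toNat : Int) ∧ (c.toNat : Int) ≤ 122)
      ∨ (65 ≤ (c.toNat : Int) ∧ (c.toNat : Int) ≤ 90)
      ∨ (48 ≤ (c.toNat : Int) ∧ (c.toNat : Int) ≤ 57))
      ∧ (c.toNat : Int) ≠ 32 ∧ (c.toNat : Int) ≠ 10))
  decide (pvBool2Int low + pvBool2Int up + pvBool2Int dig + pvBool2Int oth ≥ 3)

-- ===== PRECONDITION & SPEC =====
def Spec_check_rule_2 (str : String) (out : Bool) : Prop := out = check_rule_2_alt str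
instance (str : String) (out : Bool) : Decidable (Spec_check_rule_2 str out) := by unfold Spec_check_rule_2; infer_instance

-- ===== CLAIM (what is proved, stated in full; the proofs are below) =====
def Claim_equal_check_rule_2 : Prop := ∀ (str : String), Dom_check_rule_2 str → Spec_check_rule_2 str (check_rule_2 str)

-- ===== LEMMAS AND PROOFS =====

def pvLow (c : Char) : Bool := decide (97 ≤ (c.toNat : Int) ∧ (c.toNat : Int) ≤ 122)
def pvUp (c : Char) : Bool := decide (65 ≤ (c.toNat : Int) ∧ (c.toNat : Int) ≤ 90)
def pvDig (c : Char) : Bool := decide (48 ≤ (c.toNat : Int) ∧ (c.toNat : Int) ≤ 57)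
def pvOth (c : Char) : Bool := decide (¬ ((97 ≤ (c.toNat : Int) ∧ (c.toNat : Int) ≤ 122)
      ∨ (65 ≤ (c.toNat : Int) ∧ (c.toNat : Int) ≤ 90)
      ∨ (48 ≤ (c.toNat : Int) ∧ (c.toNat : Int) ≤ 57))
      ∧ (c.toNat : Int) ≠ 32 ∧ (c.toNat : Int) ≠ 10)

theorem checkRule2Loop_eq (l : List Char) (bc bC bn bo : Bool) :
    checkRule2Loop l (pvBool2Int bc) (pvBool2Int bC) (pvBool2Int bn) (pvBool2Int bo) =
    decide (pvBool2Int (bc || l.any pvLow) + pvBool2Int (bC || l.any pvUp)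
      + pvBool2Int (bn || l.any pvDig) + pvBool2Int (bo || l.any pvOth) ≥ 3) := by
  induction l generalizing bc bC bn bo with
  | nil => simp [checkRule2Loop]
  | cons ch rest ih =>
    simp only [checkRule2Loop, List.any_cons]
    by_cases h3 : pvBool2Int bc + pvBool2Int bC + pvBool2Int bn + pvBool2Int bo ≥ 3
    · rw [if_pos h3]
      cases bc <;> cases bC <;> cases bn <;> cases bo <;>
        simp_all [pvBool2Int] <;> omega
    · rw [if_neg h3]
      by_cases h1 : (ch.toNat : Int) ≥ 97 ∧ (ch.toNat : Int) ≤ 122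
      · rw [if_pos h1]
        have := ih true bC bn bo
        simp only [pvBool2Int, if_true] at this ⊢
        rw [this]
        have hl : pvLow ch = true := by simp [pvLow]; omega
        have hu : pvUp ch = false := by simp [pvUp]; omega
        have hd : pvDig ch = false := by simp [pvDig]; omega
        have ho : pvOth ch = false := by simp [pvOth]; omega
        simp [hl, hu, hd, ho]
      · rw [if_neg h1]
        by_cases h2 : (ch.toNat : Int) ≥ 65 ∧ (ch.toNat : Int) ≤ 90
        · rw [if_pos h2]
          have := ih bc true bn bo
          simp only [pvBool2Int, if_true] at this ⊢
          rw [this]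
          have hl : pvLow ch = false := by simp [pvLow]; omega
          have hu : pvUp ch = true := by simp [pvUp]; omega
          have hd : pvDig ch = false := by simp [pvDig]; omega
          have ho : pvOth ch = false := by simp [pvOth]; omega
          simp [hl, hu, hd, ho]
        · rw [if_neg h2]
          by_cases h4 : (ch.toNat : Int) ≥ 48 ∧ (ch.toNat : Int) ≤ 57
          · rw [if_pos h4]
            have := ih bc bC true bo
            simp only [pvBool2Int, if_true] at this ⊢
            rw [this]
            have hl : pvLow ch = false := by simp [pvLow]; omega
            have hu : pvUp ch = false := by simp [pvUp]; omega
            have hd : pvDig ch = true := by simp [pvDig]; omega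
            have ho : pvOth ch = false := by simp [pvOth]; omega
            simp [hl, hu, hd, ho]
          · rw [if_neg h4]
            by_cases h5 : (ch.toNat : Int) ≠ 32 ∧ (ch.toNat : Int) ≠ 10
            · rw [if_pos h5]
              have := ih bc bC bn true
              simp only [pvBool2Int, if_true] at this ⊢
              rw [this]
              have hl : pvLow ch = false := by simp [pvLow]; omega
              have hu : pvUp ch = false := by simp [pvUp]; omega
              have hd : pvDig ch = false := by simp [pvDig]; omega
              have ho : pvOth ch = true := by simp [pvOth]; omega
              simp [hl, hu, hd, ho]
            · rw [if_neg h5]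
              have := ih bc bC bn bo
              simp only [pvBool2Int] at this ⊢
              rw [this]
              have hl : pvLow ch = false := by simp [pvLow]; omega
              have hu : pvUp ch = false := by simp [pvUp]; omega
              have hd : pvDig ch = false := by simp [pvDig]; omega
              have ho : pvOth ch = false := by simp [pvOth]; omega
              simp [hl, hu, hd, ho]

-- ===== VERDICT (by name: the statement is the Claim_ definition above) =====
theorem check_rule_2_spec : Claim_equal_check_rule_2 := by
  intro str _
  show check_rule_2 str = check_rule_2_alt str
  have h := checkRule2Loop_eq str.toList false false false false
  simp only [pvBool2Int, Bool.false_or] at h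
  simpa [check_rule_2, check_rule_2_alt, pvLow, pvUp, pvDig, pvOth, pvBool2Int] using h
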